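-- pv_equiv track=rewrite | github.com/ispiroglu/packer-py | genetic-bla-memo.py | find_connected_regions
-- ===== SOURCE A (Python) =====
-- def find_connected_regions(matrix):
--     connected_regions = []
--     visited = [[False] * len(matrix[0]) for _ in range(len(matrix))]
--
--     def explore_connected_component(start_i, start_j, number):
--         connected_component = []
--         stack = [(start_i, start_j)]
--         while stack:
--             i, j = stack.pop()
--             if 0 <= i < len(matrix) and 0 <= j < len(matrix[0]) and matrix[i][j] == number and not visited[i][j]:
--                 connected_component.append((j, i, number))
--                 visited[i][j] = True
--                 stack.append((i, j + 1))  # Move right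
--                 stack.append((i + 1, j))  # Move down
--         return connected_component
--
--     for number in range(1, max(max(row) for row in matrix) + 1):
--         for i in range(len(matrix)):
--             for j in range(len(matrix[0])):
--                 if matrix[i][j] == number and not visited[i][j]:
--                     connected_component = explore_connected_component(i, j, number)
--                     connected_regions.append(connected_component)
--     return connected_regions
-- ===== SOURCE B (Python) =====
-- def find_connected_regions(matrix):
--     rows = len(matrix)
--     cols = len(matrix[0])
--     visited = [[False] * cols for _ in matrix]
--     buckets = {}
--     for i, row in enumerate(matrix):
--         for j in range(cols):
--             number = row[j]
--             if number >= 1 and not visited[i][j]: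
--                 component = []
--                 pending = [(i, j)]
--                 while pending:
--                     a, b = pending.pop()
--                     # walk straight down, remembering each right neighbour for later;
--                     # popping pending LIFO reproduces depth-first, down-before-right order
--                     while a < rows and b < cols and matrix[a][b] == number and not visited[a][b]:
--                         component.append((b, a, number))
--                         visited[a][b] = True
--                         pending.append((a, b + 1))
--                         a += 1
--                 buckets.setdefault(number, []).append(component)
--     result = []
--     for value in sorted(buckets):
--         result += buckets[value]
--     return result
-- ===== Notes on version B (the rewrite author's own statement) =====
-- stated objective: faster
-- what changed: B replaces A's outer loop over every integer value from 1 to max(matrix) (each with a full matrix rescan and a pure-stack DFS) by a single enumerate-driven pass that walks each region with a down-run walker stacking only right neighbours and buckets it into a dict keyed by value, emitting buckets in ascending key order.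
-- outside the precondition, e.g. on find_connected_regions([]): A raises ValueError, B raises IndexError; on find_connected_regions([[0, 0], [0]]): A returns [], B raises IndexError
import Mathlib
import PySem

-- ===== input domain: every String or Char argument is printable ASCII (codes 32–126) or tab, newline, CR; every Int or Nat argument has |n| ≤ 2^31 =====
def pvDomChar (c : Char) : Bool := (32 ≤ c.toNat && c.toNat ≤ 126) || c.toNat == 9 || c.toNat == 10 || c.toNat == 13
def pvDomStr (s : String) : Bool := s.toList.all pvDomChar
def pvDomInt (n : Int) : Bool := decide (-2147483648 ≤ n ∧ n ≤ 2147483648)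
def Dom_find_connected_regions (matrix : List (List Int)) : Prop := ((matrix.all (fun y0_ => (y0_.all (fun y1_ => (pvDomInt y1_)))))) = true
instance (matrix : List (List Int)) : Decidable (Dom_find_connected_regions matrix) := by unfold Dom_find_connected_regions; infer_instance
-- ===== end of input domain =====

-- B replaces A's outer loop over every value 1..max(matrix) (a full matrix rescan per value) by one
-- enumerate-driven row-major pass whose walker descends whole down-runs (stacking only the right
-- neighbours) and buckets each region into a dict keyed by value, emitted in ascending key order.

-- ===== PORT A =====
def pvCols (matrix : List (List Int)) : Nat := (matrix.headD []).length

def pvAtN (matrix : List (List Int)) (i j : Nat) : Int := (matrix.getD i []).getD j 0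

def pvAt (matrix : List (List Int)) (i j : Int) : Int := pvAtN matrix i.toNat j.toNat

def pvVisN (vis : List (List Bool)) (i j : Nat) : Bool := (vis.getD i []).getD j false

def pvVis (vis : List (List Bool)) (i j : Int) : Bool := pvVisN vis i.toNat j.toNat

def pvMarkN (vis : List (List Bool)) (i j : Nat) : List (List Bool) :=
  vis.modify i (fun row => row.set j true)

def pvMark (vis : List (List Bool)) (i j : Int) : List (List Bool) := pvMarkN vis i.toNat j.toNat

def pvInB (matrix : List (List Int)) (i j : Int) : Bool :=
  decide (0 ≤ i) && decide (i < (matrix.length : Int)) && decide (0 ≤ j) && decide (j < (pvCols matrix : Int))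

def pvVisInit (matrix : List (List Int)) : List (List Bool) :=
  matrix.map (fun _ => List.replicate (pvCols matrix) false)

-- totality fuel for the while loop: each iteration pops one entry; at most 1 + 2*R*C entries are ever pushed
def pvFuel (matrix : List (List Int)) : Nat := 2 * matrix.length * pvCols matrix + 1

-- 'explore_connected_component': stack loop, pop from the top, push right then down (down explored first)
def pvExplore (matrix : List (List Int)) (number : Int) :
    Nat → List (Int × Int) → List (List Bool) → List (Int × Int × Int) × List (List Bool)
  | 0, _, vis => ([], vis)
  | _ + 1, [], vis => ([], vis)
  | fuel + 1, (i, j) :: rest, vis =>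
      if pvInB matrix i j && (pvAt matrix i j == number) && !pvVis vis i j then
        let res := pvExplore matrix number fuel ((i + 1, j) :: (i, j + 1) :: rest) (pvMark vis i j)
        ((j, i, number) :: res.1, res.2)
      else
        pvExplore matrix number fuel rest vis

-- body of A's innermost loop: 'if matrix[i][j] == number and not visited[i][j]: … append'
def pvStepA (matrix : List (List Int)) (number : Int)
    (st : List (List (Int × Int × Int)) × List (List Bool)) (c : Int × Int) :
    List (List (Int × Int × Int)) × List (List Bool) :=
  if (pvAt matrix c.1 c.2 == number) && !pvVis st.2 c.1 c.2 then
    let res := pvExplore matrix number (pvFuel matrix) [c] st.2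
    (st.1 ++ [res.1], res.2)
  else st

def find_connected_regions (matrix : List (List Int)) : List (List (Int × Int × Int)) :=
  let maxv : Int :=
    (PySem.List.max? (matrix.map (fun row => (PySem.List.max? row (fun x => x)).getD 0)) (fun x => x)).getD 0
  ((PySem.List.pyRange 1 (maxv + 1)).foldl (fun st number =>
      (PySem.List.pyRange 0 (matrix.length : Int)).foldl (fun st i =>
        (PySem.List.pyRange 0 ((pvCols matrix : Nat) : Int)).foldl (fun st j =>
          pvStepA matrix number st (i, j)) st) st)
    ([], pvVisInit matrix)).1

-- ===== PORT B =====
-- B's primitives: 'matrix[a][b]' / 'visited[a][b]' reads (Python indexing via pyGetD), the write,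
-- 'cols = len(matrix[0])', the all-False grid, and the fuel of B's two nested while loops
-- (one unit per inner step or per pop; ≤ R*C processed cells + R*C + 1 pops).
def pvColsB (matrix : List (List Int)) : Nat := (matrix.headD []).length

def pvCell (matrix : List (List Int)) (a b : Int) : Int :=
  PySem.List.pyGetD (PySem.List.pyGetD matrix a []) b 0

def pvSeen (vis : List (List Bool)) (a b : Int) : Bool :=
  PySem.List.pyGetD (PySem.List.pyGetD vis a []) b false

def pvSet (vis : List (List Bool)) (a b : Int) : List (List Bool) :=
  vis.modify a.toNat (fun row => row.set b.toNat true)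

def pvGrid0 (matrix : List (List Int)) : List (List Bool) :=
  matrix.map (fun _ => List.replicate (pvColsB matrix) false)

def pvFuelB (matrix : List (List Int)) : Nat := 2 * matrix.length * pvColsB matrix + 1

-- B's walker: 'while pending: a,b = pending.pop(); while a < rows and b < cols and …: append; mark;
-- pending.append((a, b+1)); a += 1' — the current cell is a register, only right neighbours are stacked
def pvWalk (matrix : List (List Int)) (number : Int) :
    Nat → Int → Int → List (Int × Int) → List (List Bool) → List (Int × Int × Int) × List (List Bool)
  | 0, _, _, _, vis => ([], vis)
  | fuel + 1, a, b, pending, vis =>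
      if decide (a < (matrix.length : Int)) && decide (b < (pvColsB matrix : Int))
          && (pvCell matrix a b == number) && !pvSeen vis a b then
        let res := pvWalk matrix number fuel (a + 1) b ((a, b + 1) :: pending) (pvSet vis a b)
        ((b, a, number) :: res.1, res.2)
      else
        match pending with
        | [] => ([], vis)
        | c :: rest => pvWalk matrix number fuel c.1 c.2 rest vis

-- body of B's scan: 'number = row[j]; if number >= 1 and not visited[i][j]: walk; bucket it'
def pvStepW (matrix : List (List Int))
    (st : PySem.Dict Int (List (List (Int × Int × Int))) × List (List Bool))
    (i : Int) (row : List Int) (j : Int) :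
    PySem.Dict Int (List (List (Int × Int × Int))) × List (List Bool) :=
  let number := PySem.List.pyGetD row j 0
  if decide (1 ≤ number) && !pvSeen st.2 i j then
    let res := pvWalk matrix number (pvFuelB matrix) i j [] st.2
    (st.1.modify number [] (fun l => l ++ [res.1]), res.2)
  else st

def find_connected_regions_alt (matrix : List (List Int)) : List (List (Int × Int × Int)) :=
  let st :=
    (PySem.List.enumerate matrix).foldl (fun st p =>
      (PySem.List.pyRange 0 ((pvColsB matrix : Nat) : Int)).foldl (fun st j =>
        pvStepW matrix st p.1 p.2 j) st)
    ((PySem.Dict.empty : PySem.Dict Int (List (List (Int × Int × Int)))), pvGrid0 matrix)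
  (PySem.List.sorted st.1.keys (fun x => x)).foldl (fun out v => out ++ st.1.getD v []) []

-- ===== PRECONDITION & SPEC =====
-- Pre_ excludes inputs where Python raises: the empty matrix (A: ValueError from max() of an empty
-- sequence, B: IndexError), an empty first row (max() of an empty row, ValueError), and matrices
-- with a row shorter than row 0 (IndexError as soon as the value sweep reads the missing cell —
-- except when every entry is ≤ 0, where A returns [] but B's single pass still reads the missing
-- cells and raises IndexError, so those ragged inputs stay excluded too).
def Pre_find_connected_regions (matrix : List (List Int)) : Prop :=
  matrix ≠ [] ∧ (matrix.headD []) ≠ [] ∧ ∀ row ∈ matrix, (matrix.headD []).length ≤ row.length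
instance (matrix : List (List Int)) : Decidable (Pre_find_connected_regions matrix) := by
  unfold Pre_find_connected_regions; infer_instance

def pvWitness_find_connected_regions : List (List Int) := [[1, 2], [2, 2]]

def Spec_find_connected_regions (matrix : List (List Int)) (out : List (List (Int × Int × Int))) : Prop :=
  out = find_connected_regions_alt matrix
instance (matrix : List (List Int)) (out : List (List (Int × Int × Int))) :
    Decidable (Spec_find_connected_regions matrix out) := by
  unfold Spec_find_connected_regions; infer_instance

-- ===== CLAIM (what is proved, stated in full; the proofs are below) =====
def Claim_equal_find_connected_regions : Prop :=
  ∀ (matrix : List (List Int)), Dom_find_connected_regions matrix →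
    Pre_find_connected_regions matrix →
    Spec_find_connected_regions matrix (find_connected_regions matrix)

-- ===== LEMMAS AND PROOFS =====

-- proof-side intermediate: A's inner 'explore' wrapped as a row-major scan step carrying the bucket
def pvStepB (matrix : List (List Int))
    (st : PySem.Dict Int (List (List (Int × Int × Int))) × List (List Bool)) (c : Int × Int) :
    PySem.Dict Int (List (List (Int × Int × Int))) × List (List Bool) :=
  let number := pvAt matrix c.1 c.2
  if decide (1 ≤ number) && !pvVis st.2 c.1 c.2 then
    let res := pvExplore matrix number (pvFuel matrix) [c] st.2
    (st.1.modify number [] (fun l => l ++ [res.1]), res.2)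
  else st

-- abbreviations for the proofs
def pvShape (matrix : List (List Int)) (vis : List (List Bool)) : Prop :=
  vis.length = matrix.length ∧ ∀ row ∈ vis, row.length = pvCols matrix

-- the two visited grids agree on every in-bounds cell of value v
def pvAgree (matrix : List (List Int)) (v : Int) (x y : List (List Bool)) : Prop :=
  ∀ i j : Nat, i < matrix.length → j < pvCols matrix → pvAtN matrix i j = v →
    pvVisN x i j = pvVisN y i j

def pvCellB (matrix : List (List Int)) (c : Int × Int) : Prop :=
  0 ≤ c.1 ∧ c.1 < (matrix.length : Int) ∧ 0 ≤ c.2 ∧ c.2 < ((pvCols matrix : Nat) : Int)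

def pvCells (matrix : List (List Int)) : List (Int × Int) :=
  (PySem.List.pyRange 0 (matrix.length : Int)).flatMap (fun i =>
    (PySem.List.pyRange 0 ((pvCols matrix : Nat) : Int)).map (fun j => (i, j)))

def pvPassL (matrix : List (List Int)) (v : Int) (cs : List (Int × Int))
    (st : List (List (Int × Int × Int)) × List (List Bool)) :
    List (List (Int × Int × Int)) × List (List Bool) :=
  cs.foldl (pvStepA matrix v) st

-- the regions of value v, as A's dedicated sweep for v computes them from a fresh grid
def pvP (matrix : List (List Int)) (v : Int) : List (List (Int × Int × Int)) :=
  (pvPassL matrix v (pvCells matrix) ([], pvVisInit matrix)).1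

-- B's loop invariant, per processed prefix of cells
def pvRel (matrix : List (List Int)) (cs : List (Int × Int))
    (d : PySem.Dict Int (List (List (Int × Int × Int)))) (w : List (List Bool)) : Prop :=
  d.keys.Nodup ∧ pvShape matrix w ∧ (∀ v ∈ d.keys, 1 ≤ v) ∧
  ∀ v : Int, 1 ≤ v →
    d.getD v [] = (pvPassL matrix v cs ([], pvVisInit matrix)).1 ∧
    (v ∈ d.keys ↔ (pvPassL matrix v cs ([], pvVisInit matrix)).1 ≠ []) ∧
    pvAgree matrix v w (pvPassL matrix v cs ([], pvVisInit matrix)).2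

-- === B's walker is A's stack loop with the current cell held in a register ===
lemma pv_explore_nil (matrix : List (List Int)) (v : Int) (f : Nat) (vis : List (List Bool)) :
    pvExplore matrix v f [] vis = ([], vis) := by
  cases f <;> rfl

lemma pv_cell_eq_at (matrix : List (List Int)) (a b : Int) (ha : 0 ≤ a) (hb : 0 ≤ b) :
    pvCell matrix a b = pvAt matrix a b := by
  rw [pvCell, pvAt, pvAtN, PySem.List.pyGetD_of_nonneg _ _ ha,
    PySem.List.pyGetD_of_nonneg _ _ hb]

lemma pv_seen_eq_vis (vis : List (List Bool)) (a b : Int) (ha : 0 ≤ a) (hb : 0 ≤ b) :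
    pvSeen vis a b = pvVis vis a b := by
  rw [pvSeen, pvVis, pvVisN, PySem.List.pyGetD_of_nonneg _ _ ha,
    PySem.List.pyGetD_of_nonneg _ _ hb]

lemma pv_walk_eq_explore (matrix : List (List Int)) (v : Int) (f : Nat) :
    ∀ (a b : Int) (pending : List (Int × Int)) (vis : List (List Bool)),
      0 ≤ a → 0 ≤ b → (∀ p ∈ pending, 0 ≤ p.1 ∧ 0 ≤ p.2) →
      pvWalk matrix v f a b pending vis = pvExplore matrix v f ((a, b) :: pending) vis := by
  induction f with
  | zero => intro a b pending vis _ _ _; rfl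
  | succ f ih =>
    intro a b pending vis ha hb hpend
    have hcond : (decide (a < (matrix.length : Int)) && decide (b < (pvColsB matrix : Int))
          && (pvCell matrix a b == v) && !pvSeen vis a b)
        = (pvInB matrix a b && (pvAt matrix a b == v) && !pvVis vis a b) := by
      rw [pv_cell_eq_at matrix a b ha hb, pv_seen_eq_vis vis a b ha hb, pvInB, pvColsB, pvCols]
      have h0a : decide (0 ≤ a) = true := by simpa using ha
      have h0b : decide (0 ≤ b) = true := by simpa using hb
      rw [h0a, h0b]
      cases decide (a < (matrix.length : Int)) <;>
        cases decide (b < (((matrix.headD []).length : Nat) : Int)) <;>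
        cases (pvAt matrix a b == v) <;> cases pvVis vis a b <;> rfl
    simp only [pvWalk]
    rw [pvExplore, hcond]
    split
    · have hstep := ih (a + 1) b ((a, b + 1) :: pending) (pvSet vis a b)
        (by omega) hb
        (by
          intro p hp
          rcases List.mem_cons.mp hp with rfl | hp
          · exact ⟨ha, by omega⟩
          · exact hpend p hp)
      rw [hstep]; rfl
    · match pending, hpend with
      | [], _ => rw [pv_explore_nil]
      | (c₁, c₂) :: rest, hpend =>
        exact ih c₁ c₂ rest vis (hpend (c₁, c₂) List.mem_cons_self).1
          (hpend (c₁, c₂) List.mem_cons_self).2 (fun p hp => hpend p (List.mem_cons_of_mem _ hp))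

lemma pv_stepW_eq_stepB (matrix : List (List Int)) (hpre : Pre_find_connected_regions matrix)
    (st : PySem.Dict Int (List (List (Int × Int × Int))) × List (List Bool)) (i j : Int)
    (hi : 0 ≤ i ∧ i < (matrix.length : Int)) (hj : 0 ≤ j ∧ j < ((pvCols matrix : Nat) : Int)) :
    pvStepW matrix st i (PySem.List.pyGetD matrix i []) j = pvStepB matrix st (i, j) := by
  obtain ⟨-, -, hlen⟩ := hpre
  have hiN : i.toNat < matrix.length := by omega
  have hrow : PySem.List.pyGetD matrix i [] = matrix.getD i.toNat [] :=
    PySem.List.pyGetD_of_nonneg _ _ hi.1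
  have hrowlen : pvCols matrix ≤ (matrix.getD i.toNat []).length := by
    have : matrix.getD i.toNat [] = matrix[i.toNat] := by
      simp [List.getD_eq_getElem?_getD, List.getElem?_eq_getElem hiN]
    rw [this]
    exact hlen _ (List.getElem_mem hiN)
  have hnum : PySem.List.pyGetD (PySem.List.pyGetD matrix i []) j 0 = pvAt matrix i j := by
    rw [hrow, pvAt, pvAtN, PySem.List.pyGetD_of_nonneg _ _ hj.1]
  rw [pvStepW, pvStepB, hnum, pv_seen_eq_vis st.2 i j hi.1 hj.1,
    pv_walk_eq_explore matrix _ _ i j [] st.2 hi.1 hj.1 (by intro p hp; cases hp),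
    pvFuelB, pvColsB, pvFuel, pvCols]

lemma pv_visN_mark_ne (vis : List (List Bool)) (a b i j : Nat) (h : ¬(i = a ∧ j = b)) :
    pvVisN (pvMarkN vis a b) i j = pvVisN vis i j := by
  simp only [pvVisN, pvMarkN, List.getD_eq_getElem?_getD, List.getElem?_modify]
  rcases eq_or_ne i a with rfl|hi
  · have hj : j ≠ b := fun hj => h ⟨rfl, hj⟩
    cases hv : vis[i]? with
    | none => simp
    | some row => simp [Ne.symm hj]
  · simp [Ne.symm hi]

lemma pv_visN_mark_self (vis : List (List Bool)) (a b : Nat)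
    (ha : a < vis.length) (hb : b < (vis.getD a []).length) :
    pvVisN (pvMarkN vis a b) a b = true := by
  simp only [pvVisN, pvMarkN, List.getD_eq_getElem?_getD, List.getElem?_modify]
  have hsome : vis[a]? = some vis[a] := List.getElem?_eq_getElem ha
  have hb' : b < vis[a].length := by simpa [List.getD_eq_getElem?_getD, hsome] using hb
  simp [hsome, hb']

lemma pv_shape_mark (matrix : List (List Int)) (vis : List (List Bool)) (a b : Nat)
    (h : pvShape matrix vis) : pvShape matrix (pvMarkN vis a b) := by
  obtain ⟨h1, h2⟩ := h
  refine ⟨by simpa [pvMarkN] using h1, ?_⟩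
  intro row hrow
  rw [List.mem_iff_getElem] at hrow
  obtain ⟨k, hk, rfl⟩ := hrow
  simp only [pvMarkN]
  rw [List.getElem_modify]
  have hk' : k < vis.length := by simpa [pvMarkN, List.length_modify] using hk
  split
  · rw [List.length_set]; exact h2 _ (List.getElem_mem hk')
  · exact h2 _ (List.getElem_mem hk')

lemma pv_shape_init (matrix : List (List Int)) : pvShape matrix (pvVisInit matrix) := by
  constructor
  · simp [pvVisInit]
  · intro row hrow
    simp only [pvVisInit, List.mem_map] at hrow
    obtain ⟨_, _, rfl⟩ := hrow
    simp

lemma pv_inB_iff (matrix : List (List Int)) (i j : Int) :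
    pvInB matrix i j = true ↔
      0 ≤ i ∧ i.toNat < matrix.length ∧ 0 ≤ j ∧ j.toNat < pvCols matrix := by
  simp only [pvInB, Bool.and_eq_true, decide_eq_true_eq]
  omega

lemma pv_shape_row_len (matrix : List (List Int)) (x : List (List Bool)) (a : Nat)
    (h : pvShape matrix x) (ha : a < x.length) : (x.getD a []).length = pvCols matrix := by
  have he : x.getD a [] = x[a] := by simp [List.getD_eq_getElem?_getD, List.getElem?_eq_getElem ha]
  rw [he]; exact h.2 _ (List.getElem_mem ha)

lemma pv_explore_untouched (matrix : List (List Int)) (v : Int) (f : Nat)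
    (stack : List (Int × Int)) (x : List (List Bool)) (i j : Nat)
    (h : ¬(i < matrix.length ∧ j < pvCols matrix ∧ pvAtN matrix i j = v)) :
    pvVisN (pvExplore matrix v f stack x).2 i j = pvVisN x i j := by
  induction f generalizing stack x with
  | zero => simp [pvExplore]
  | succ f ih =>
    match stack with
    | [] => simp [pvExplore]
    | (a, b) :: rest =>
      rw [pvExplore]
      split
      next hcond =>
        simp only [Bool.and_eq_true, beq_iff_eq, Bool.not_eq_eq_eq_not, Bool.not_true] at hcond
        obtain ⟨⟨hb, hv⟩, _⟩ := hcond
        rw [pv_inB_iff] at hb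
        rw [ih]
        apply pv_visN_mark_ne
        rintro ⟨rfl, rfl⟩
        exact h ⟨hb.2.1, hb.2.2.2, hv⟩
      next => exact ih _ _

lemma pv_explore_shape (matrix : List (List Int)) (v : Int) (f : Nat)
    (stack : List (Int × Int)) (x : List (List Bool)) (h : pvShape matrix x) :
    pvShape matrix (pvExplore matrix v f stack x).2 := by
  induction f generalizing stack x with
  | zero => simpa [pvExplore] using h
  | succ f ih =>
    match stack with
    | [] => simpa [pvExplore] using h
    | (a, b) :: rest =>
      rw [pvExplore]
      split
      next => exact ih _ _ (pv_shape_mark _ _ _ _ h)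
      next => exact ih _ _ h

lemma pv_explore_agree (matrix : List (List Int)) (v : Int) (f : Nat)
    (stack : List (Int × Int)) (x y : List (List Bool))
    (hx : pvShape matrix x) (hy : pvShape matrix y) (h : pvAgree matrix v x y) :
    (pvExplore matrix v f stack x).1 = (pvExplore matrix v f stack y).1 ∧
      pvAgree matrix v (pvExplore matrix v f stack x).2 (pvExplore matrix v f stack y).2 := by
  induction f generalizing stack x y with
  | zero => exact ⟨by simp [pvExplore], by simpa [pvExplore] using h⟩
  | succ f ih =>
    match stack with
    | [] => exact ⟨by simp [pvExplore], by simpa [pvExplore] using h⟩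
    | (a, b) :: rest =>
      have hgeq : (pvInB matrix a b && (pvAt matrix a b == v) && !pvVis x a b)
          = (pvInB matrix a b && (pvAt matrix a b == v) && !pvVis y a b) := by
        by_cases hbB : pvInB matrix a b = true
        · by_cases hv : pvAt matrix a b = v
          · have hbb := (pv_inB_iff matrix a b).mp hbB
            have := h a.toNat b.toNat hbb.2.1 hbb.2.2.2 hv
            simp [pvVis, this]
          · have : (pvAt matrix a b == v) = false := by simpa using hv
            simp [this]
        · have hf : pvInB matrix a b = false := by revert hbB; cases pvInB matrix a b <;> simp
          simp [hf]
      rw [pvExplore, pvExplore, hgeq]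
      split
      next hcond =>
        simp only [Bool.and_eq_true, beq_iff_eq, Bool.not_eq_true'] at hcond
        obtain ⟨⟨hbB, hvv⟩, hnv⟩ := hcond
        have hbb := (pv_inB_iff matrix a b).mp hbB
        have hmx := pv_shape_mark matrix x a.toNat b.toNat hx
        have hmy := pv_shape_mark matrix y a.toNat b.toNat hy
        have hag' : pvAgree matrix v (pvMark x a b) (pvMark y a b) := by
          intro i j hi hj hval
          by_cases hc : i = a.toNat ∧ j = b.toNat
          · obtain ⟨rfl, rfl⟩ := hc
            rw [pvMark, pvMark,
              pv_visN_mark_self _ _ _ (by rw [hx.1]; exact hbb.2.1)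
                (by rw [pv_shape_row_len matrix x _ hx (by rw [hx.1]; exact hbb.2.1)]; exact hbb.2.2.2),
              pv_visN_mark_self _ _ _ (by rw [hy.1]; exact hbb.2.1)
                (by rw [pv_shape_row_len matrix y _ hy (by rw [hy.1]; exact hbb.2.1)]; exact hbb.2.2.2)]
          · rw [pvMark, pvMark, pv_visN_mark_ne _ _ _ _ _ hc, pv_visN_mark_ne _ _ _ _ _ hc]
            exact h i j hi hj hval
        obtain ⟨h1, h2⟩ := ih ((a + 1, b) :: (a, b + 1) :: rest) _ _ hmx hmy hag'
        exact ⟨by simp only [pvMark]; simpa using congrArg (List.cons (b, a, v)) h1,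
          by simp only [pvMark]; exact h2⟩
      next => exact ih _ _ _ hx hy h

lemma pv_passL_cons (matrix : List (List Int)) (v : Int) (c : Int × Int) (cs : List (Int × Int))
    (st : List (List (Int × Int × Int)) × List (List Bool)) :
    pvPassL matrix v (c :: cs) st = pvPassL matrix v cs (pvStepA matrix v st c) := rfl

lemma pv_passL_append (matrix : List (List Int)) (v : Int) (cs cs' : List (Int × Int))
    (st : List (List (Int × Int × Int)) × List (List Bool)) :
    pvPassL matrix v (cs ++ cs') st = pvPassL matrix v cs' (pvPassL matrix v cs st) :=
  List.foldl_append

lemma pv_pass_acc (matrix : List (List Int)) (v : Int) (cs : List (Int × Int))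
    (acc : List (List (Int × Int × Int))) (vis : List (List Bool)) :
    pvPassL matrix v cs (acc, vis) =
      (acc ++ (pvPassL matrix v cs ([], vis)).1, (pvPassL matrix v cs ([], vis)).2) := by
  induction cs generalizing acc vis with
  | nil => simp [pvPassL]
  | cons c cs ih =>
    rw [pv_passL_cons, pv_passL_cons]
    by_cases hg : ((pvAt matrix c.1 c.2 == v) && !pvVis vis c.1 c.2) = true
    · simp only [pvStepA, hg, if_true]
      set e := pvExplore matrix v (pvFuel matrix) [c] vis with he
      rw [ih (acc ++ [e.1]) e.2, ih ([] ++ [e.1]) e.2]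
      simp
    · simp only [pvStepA, hg]
      exact ih acc vis

lemma pv_pass_untouched (matrix : List (List Int)) (v : Int) (cs : List (Int × Int))
    (st : List (List (Int × Int × Int)) × List (List Bool)) (i j : Nat)
    (h : ¬(i < matrix.length ∧ j < pvCols matrix ∧ pvAtN matrix i j = v)) :
    pvVisN (pvPassL matrix v cs st).2 i j = pvVisN st.2 i j := by
  induction cs generalizing st with
  | nil => simp [pvPassL]
  | cons c cs ih =>
    rw [pv_passL_cons, ih]
    by_cases hg : ((pvAt matrix c.1 c.2 == v) && !pvVis st.2 c.1 c.2) = true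
    · simp only [pvStepA, hg, if_true]
      exact pv_explore_untouched matrix v _ _ _ i j h
    · simp [pvStepA, hg]

lemma pv_pass_shape (matrix : List (List Int)) (v : Int) (cs : List (Int × Int))
    (st : List (List (Int × Int × Int)) × List (List Bool)) (h : pvShape matrix st.2) :
    pvShape matrix (pvPassL matrix v cs st).2 := by
  induction cs generalizing st with
  | nil => simpa [pvPassL] using h
  | cons c cs ih =>
    rw [pv_passL_cons]
    apply ih
    by_cases hg : ((pvAt matrix c.1 c.2 == v) && !pvVis st.2 c.1 c.2) = true
    · simp only [pvStepA, hg, if_true]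
      exact pv_explore_shape matrix v _ _ _ h
    · simpa [pvStepA, hg] using h

lemma pv_pass_agree (matrix : List (List Int)) (v : Int) (cs : List (Int × Int))
    (hb : ∀ c ∈ cs, pvCellB matrix c) :
    ∀ (x y : List (List Bool)), pvShape matrix x → pvShape matrix y → pvAgree matrix v x y →
    ∀ (acc : List (List (Int × Int × Int))),
      (pvPassL matrix v cs (acc, x)).1 = (pvPassL matrix v cs (acc, y)).1 ∧
        pvAgree matrix v (pvPassL matrix v cs (acc, x)).2 (pvPassL matrix v cs (acc, y)).2 := by
  induction cs with
  | nil => exact fun x y _ _ h acc => ⟨rfl, by simpa [pvPassL] using h⟩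
  | cons c cs ih =>
    intro x y hx hy h acc
    obtain ⟨hc, hcs⟩ := List.forall_mem_cons.mp hb
    have hgeq : ((pvAt matrix c.1 c.2 == v) && !pvVis x c.1 c.2)
        = ((pvAt matrix c.1 c.2 == v) && !pvVis y c.1 c.2) := by
      by_cases hv : pvAt matrix c.1 c.2 = v
      · obtain ⟨hc1, hc2, hc3, hc4⟩ := hc
        have hvis := h c.1.toNat c.2.toNat (by omega) (by omega) hv
        simp [pvVis, hvis]
      · have : (pvAt matrix c.1 c.2 == v) = false := by simpa using hv
        simp [this]
    rw [pv_passL_cons, pv_passL_cons]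
    by_cases hg : ((pvAt matrix c.1 c.2 == v) && !pvVis x c.1 c.2) = true
    · have hg' : ((pvAt matrix c.1 c.2 == v) && !pvVis y c.1 c.2) = true := hgeq ▸ hg
      simp only [pvStepA, hg, hg', if_true]
      obtain ⟨h1, h2⟩ := pv_explore_agree matrix v (pvFuel matrix) [c] x y hx hy h
      rw [h1]
      exact ih hcs _ _ (pv_explore_shape matrix v _ _ _ hx) (pv_explore_shape matrix v _ _ _ hy) h2 _
    · have hg' : ¬ ((pvAt matrix c.1 c.2 == v) && !pvVis y c.1 c.2) = true := hgeq ▸ hg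
      simp only [pvStepA, hg, hg']
      exact ih hcs _ _ hx hy h acc

lemma pv_pass_nil_of_no_v (matrix : List (List Int)) (v : Int) (cs : List (Int × Int))
    (h : ∀ c ∈ cs, pvAt matrix c.1 c.2 ≠ v)
    (st : List (List (Int × Int × Int)) × List (List Bool)) :
    pvPassL matrix v cs st = st := by
  induction cs generalizing st with
  | nil => simp [pvPassL]
  | cons c cs ih =>
    obtain ⟨hc, hcs⟩ := List.forall_mem_cons.mp h
    rw [pv_passL_cons]
    have : ((pvAt matrix c.1 c.2 == v) && !pvVis st.2 c.1 c.2) = false := by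
      have : (pvAt matrix c.1 c.2 == v) = false := by simpa using hc
      simp [this]
    simp only [pvStepA, this, Bool.false_eq_true, if_false]
    exact ih hcs st

lemma pv_mem_cells (matrix : List (List Int)) (c : Int × Int) :
    c ∈ pvCells matrix ↔ pvCellB matrix c := by
  obtain ⟨a, b⟩ := c
  simp only [pvCells, pvCellB, List.mem_flatMap, List.mem_map, PySem.List.mem_pyRange_one,
    Prod.mk.injEq]
  constructor
  · rintro ⟨i, hi, j, hj, rfl, rfl⟩
    exact ⟨hi.1, hi.2, hj.1, hj.2⟩
  · rintro ⟨h1, h2, h3, h4⟩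
    exact ⟨a, ⟨h1, h2⟩, b, ⟨h3, h4⟩, rfl, rfl⟩

lemma pv_pyRange_pairwise_lt (a b : Int) :
    (PySem.List.pyRange a b).Pairwise (· < ·) := by
  rw [PySem.List.pyRange_of_pos a b Int.one_pos]
  refine List.Pairwise.map _ (fun k l hkl => ?_) (List.pairwise_lt_range)
  omega

-- A's outer sweep over a duplicate-free value list concatenates the fresh-grid region lists
lemma pv_outerA (matrix : List (List Int)) (L : List Int) (hnd : L.Nodup) :
    ∀ (acc : List (List (Int × Int × Int))) (vis : List (List Bool)),
      pvShape matrix vis → (∀ u ∈ L, pvAgree matrix u vis (pvVisInit matrix)) →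
      (L.foldl (fun st v => pvPassL matrix v (pvCells matrix) st) (acc, vis)).1 =
        acc ++ L.flatMap (pvP matrix) := by
  induction hnd with
  | nil => intro acc vis _ _; simp
  | @cons v L hvL hLnd ih =>
    intro acc vis hsh hag
    rw [List.foldl_cons]
    have hbcells : ∀ c ∈ pvCells matrix, pvCellB matrix c :=
      fun c hc => (pv_mem_cells matrix c).mp hc
    have hagv := hag v (List.mem_cons_self)
    obtain ⟨hδ, -⟩ := pv_pass_agree matrix v (pvCells matrix) hbcells vis (pvVisInit matrix)
      hsh (pv_shape_init matrix) hagv []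
    have hsh' : pvShape matrix (pvPassL matrix v (pvCells matrix) (acc, vis)).2 :=
      pv_pass_shape matrix v (pvCells matrix) (acc, vis) hsh
    have hag' : ∀ u ∈ L, pvAgree matrix u (pvPassL matrix v (pvCells matrix) (acc, vis)).2
        (pvVisInit matrix) := by
      intro u hu i j hi hj hval
      have hne : u ≠ v := fun h => (hvL u hu h.symm).elim
      rw [pv_pass_untouched matrix v (pvCells matrix) (acc, vis) i j
        (by rintro ⟨-, -, hvv⟩; exact hne (hval ▸ hvv ▸ rfl))]
      exact hag u (List.mem_cons_of_mem _ hu) i j hi hj hval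
    have hmain := ih (pvPassL matrix v (pvCells matrix) (acc, vis)).1
      (pvPassL matrix v (pvCells matrix) (acc, vis)).2 hsh' hag'
    rw [show ((pvPassL matrix v (pvCells matrix) (acc, vis)).1,
        (pvPassL matrix v (pvCells matrix) (acc, vis)).2)
        = pvPassL matrix v (pvCells matrix) (acc, vis) from rfl] at hmain
    rw [hmain, pv_pass_acc, hδ, List.flatMap_cons]
    simp [pvP]

lemma pv_rel_nil (matrix : List (List Int)) :
    pvRel matrix [] PySem.Dict.empty (pvVisInit matrix) := by
  refine ⟨by simp [PySem.Dict.keys_empty], pv_shape_init matrix, by simp [PySem.Dict.keys_empty], ?_⟩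
  intro v hv
  refine ⟨by simp [PySem.Dict.getD_empty, pvPassL], by simp [PySem.Dict.keys_empty, pvPassL], ?_⟩
  intro i j _ _ _
  rfl

lemma pv_rel_step (matrix : List (List Int)) (cs : List (Int × Int)) (c : Int × Int)
    (d : PySem.Dict Int (List (List (Int × Int × Int)))) (w : List (List Bool))
    (hrel : pvRel matrix cs d w) (hc : pvCellB matrix c) :
    pvRel matrix (cs ++ [c]) (pvStepB matrix (d, w) c).1 (pvStepB matrix (d, w) c).2 := by
  obtain ⟨hknd, hshw, hkpos, hmain⟩ := hrel
  obtain ⟨hc1, hc2, hc3, hc4⟩ := hc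
  have hext : ∀ (v : Int) st, pvPassL matrix v (cs ++ [c]) st
      = pvStepA matrix v (pvPassL matrix v cs st) c := by
    intro v st; rw [pv_passL_append]; rfl
  have hshP : ∀ v : Int, pvShape matrix (pvPassL matrix v cs ([], pvVisInit matrix)).2 :=
    fun v => pv_pass_shape matrix v cs _ (pv_shape_init matrix)
  by_cases hv0 : 1 ≤ pvAt matrix c.1 c.2
  case neg =>
    have hgB : (decide (1 ≤ pvAt matrix c.1 c.2) && !pvVis w c.1 c.2) = false := by simp [hv0]
    simp only [pvStepB, hgB, Bool.false_eq_true, if_false]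
    refine ⟨hknd, hshw, hkpos, ?_⟩
    intro v hv
    have hne : (pvAt matrix c.1 c.2 == v) = false := by simp; omega
    have hpass : pvPassL matrix v (cs ++ [c]) ([], pvVisInit matrix)
        = pvPassL matrix v cs ([], pvVisInit matrix) := by
      rw [hext]; simp [pvStepA, hne]
    rw [hpass]
    exact hmain v hv
  case pos =>
    by_cases hvis : pvVis w c.1 c.2 = true
    case pos =>
      have hgB : (decide (1 ≤ pvAt matrix c.1 c.2) && !pvVis w c.1 c.2) = false := by
        simp [hvis]
      simp only [pvStepB, hgB, Bool.false_eq_true, if_false]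
      refine ⟨hknd, hshw, hkpos, ?_⟩
      intro v hv
      have hpass : pvPassL matrix v (cs ++ [c]) ([], pvVisInit matrix)
          = pvPassL matrix v cs ([], pvVisInit matrix) := by
        rw [hext]
        by_cases hvv : pvAt matrix c.1 c.2 = v
        · have hagr := (hmain v hv).2.2
          have hXvis : pvVis (pvPassL matrix v cs ([], pvVisInit matrix)).2 c.1 c.2 = true := by
            have := hagr c.1.toNat c.2.toNat (by omega) (by omega) (by exact hvv)
            rw [pvVis] at hvis ⊢
            rw [← this]; exact hvis
          simp [pvStepA, hXvis]
        · have hne : (pvAt matrix c.1 c.2 == v) = false := by simpa using hvv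
          simp [pvStepA, hne]
      rw [hpass]
      exact hmain v hv
    case neg =>
      have hgB : (decide (1 ≤ pvAt matrix c.1 c.2) && !pvVis w c.1 c.2) = true := by
        simp [hv0, hvis]
      simp only [pvStepB, hgB, if_true]
      set v0 := pvAt matrix c.1 c.2 with hv0def
      set E := pvExplore matrix v0 (pvFuel matrix) [c] w with hEdef
      set X := pvPassL matrix v0 cs ([], pvVisInit matrix) with hXdef
      have hagr0 := (hmain v0 hv0).2.2
      obtain ⟨hE1, hagEF⟩ := pv_explore_agree matrix v0 (pvFuel matrix) [c] w X.2 hshw (hshP v0) hagr0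
      have hXvis : pvVis X.2 c.1 c.2 = false := by
        have := hagr0 c.1.toNat c.2.toNat (by omega) (by omega) rfl
        rw [pvVis] at hvis ⊢
        rw [← this]; simpa using hvis
      have hpass0 : pvPassL matrix v0 (cs ++ [c]) ([], pvVisInit matrix)
          = (X.1 ++ [(pvExplore matrix v0 (pvFuel matrix) [c] X.2).1],
             (pvExplore matrix v0 (pvFuel matrix) [c] X.2).2) := by
        rw [hext, ← hXdef]
        have hg : ((pvAt matrix c.1 c.2 == v0) && !pvVis X.2 c.1 c.2) = true := by
          simp [← hv0def, hXvis]
        simp [pvStepA, hg]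
      refine ⟨?_, pv_explore_shape matrix v0 (pvFuel matrix) [c] w hshw, ?_, ?_⟩
      · rw [PySem.Dict.keys_modify]
        exact PySem.Dict.nodup_keys_insert _ _ _ hknd
      · intro v hvmem
        rw [PySem.Dict.keys_modify, PySem.Dict.mem_keys_insert] at hvmem
        rcases hvmem with rfl | hvmem
        · exact hv0
        · exact hkpos v hvmem
      · intro v hv
        by_cases hvv : v = v0
        · subst hvv
          refine ⟨?_, ?_, ?_⟩
          · rw [hpass0]
            simp only [PySem.Dict.getD_modify_self]
            rw [(hmain v0 hv).1, hE1]
          · rw [hpass0]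
            simp only [PySem.Dict.keys_modify, PySem.Dict.mem_keys_insert]
            simp
          · rw [hpass0]
            exact hagEF
        · have hne : (pvAt matrix c.1 c.2 == v) = false := by
            simp [← hv0def]; exact fun h => hvv h.symm
          have hpass : pvPassL matrix v (cs ++ [c]) ([], pvVisInit matrix)
              = pvPassL matrix v cs ([], pvVisInit matrix) := by
            rw [hext]; simp [pvStepA, hne]
          rw [hpass]
          refine ⟨?_, ?_, ?_⟩
          · rw [PySem.Dict.getD_modify_of_ne _ _ _ hvv]
            exact (hmain v hv).1
          · rw [PySem.Dict.keys_modify, PySem.Dict.mem_keys_insert]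
            have := (hmain v hv).2.1
            constructor
            · rintro (h | h)
              · exact absurd h hvv
              · exact this.mp h
            · intro h; exact Or.inr (this.mpr h)
          · intro i j hi hj hval
            rw [pv_explore_untouched matrix v0 (pvFuel matrix) [c] w i j
              (by rintro ⟨-, -, hvv'⟩; exact hvv (hval ▸ hvv' ▸ rfl))]
            exact (hmain v hv).2.2 i j hi hj hval

lemma pv_rel_main (matrix : List (List Int)) (cs : List (Int × Int))
    (hb : ∀ c ∈ cs, pvCellB matrix c) :
    pvRel matrix cs (cs.foldl (pvStepB matrix) (PySem.Dict.empty, pvVisInit matrix)).1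
      (cs.foldl (pvStepB matrix) (PySem.Dict.empty, pvVisInit matrix)).2 := by
  induction cs using List.reverseRecOn with
  | nil => exact pv_rel_nil matrix
  | append_singleton cs c ih =>
    rw [List.forall_mem_append] at hb
    obtain ⟨hbcs, hbc⟩ := hb
    rw [List.foldl_append, List.foldl_cons, List.foldl_nil]
    exact pv_rel_step matrix cs c _ _ (ih hbcs) (hbc c (List.mem_singleton.mpr rfl))

lemma pv_flatMap_filter_ne_nil (L : List Int) (f : Int → List (List (Int × Int × Int))) :
    L.flatMap f = (L.filter (fun v => !decide (f v = []))).flatMap f := by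
  induction L with
  | nil => simp
  | cons v L ih =>
    by_cases hv : f v = []
    · simp [hv, ih]
    · simp [hv, List.flatMap_cons, ih]

-- a nonempty region list for v forces a cell of value v, whose value is bounded by the Python max
lemma pv_le_maxv (matrix : List (List Int)) (hpre : Pre_find_connected_regions matrix)
    (v : Int) (h : pvP matrix v ≠ []) :
    v ≤ (PySem.List.max? (matrix.map (fun row => (PySem.List.max? row (fun x => x)).getD 0))
          (fun x => x)).getD 0 := by
  obtain ⟨hne, hhd, hlen⟩ := hpre
  have hex : ∃ c ∈ pvCells matrix, pvAt matrix c.1 c.2 = v := by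
    by_contra hall
    push Not at hall
    exact h (by rw [pvP, pv_pass_nil_of_no_v matrix v _ hall])
  obtain ⟨c, hcmem, hcval⟩ := hex
  obtain ⟨hc1, hc2, hc3, hc4⟩ := (pv_mem_cells matrix c).mp hcmem
  have hiR : c.1.toNat < matrix.length := by omega
  have hjC : c.2.toNat < pvCols matrix := by omega
  have hrowD : matrix.getD c.1.toNat [] = matrix[c.1.toNat] := by
    simp [List.getD_eq_getElem?_getD, List.getElem?_eq_getElem hiR]
  have hrowmem : matrix[c.1.toNat] ∈ matrix := List.getElem_mem hiR
  have hrowlen : pvCols matrix ≤ matrix[c.1.toNat].length := hlen _ hrowmem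
  have hvmem : v ∈ matrix[c.1.toNat] := by
    rw [← hcval]
    rw [pvAt, pvAtN, hrowD]
    have hj : c.2.toNat < matrix[c.1.toNat].length := by omega
    rw [List.getD_eq_getElem?_getD, List.getElem?_eq_getElem hj]
    exact List.getElem_mem hj
  have hrowne : matrix[c.1.toNat] ≠ [] := by
    intro hnil
    rw [hnil] at hrowlen
    simp only [List.length_nil, Nat.le_zero] at hrowlen
    have : pvCols matrix ≠ 0 := by
      simp only [pvCols]
      exact fun hz => hhd (List.eq_nil_of_length_eq_zero hz)
    exact this hrowlen
  obtain ⟨m, hm⟩ : ∃ m, PySem.List.max? matrix[c.1.toNat] (fun x => x) = some m := by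
    cases hmm : PySem.List.max? matrix[c.1.toNat] (fun x => x) with
    | none => exact absurd ((PySem.List.max?_eq_none_iff _ _).mp hmm) hrowne
    | some m => exact ⟨m, rfl⟩
  have hvm : v ≤ m := PySem.List.max?_isMax hm v hvmem
  have hmmem : m ∈ matrix.map (fun row => (PySem.List.max? row (fun x => x)).getD 0) := by
    rw [List.mem_map]
    exact ⟨matrix[c.1.toNat], hrowmem, by rw [hm]; rfl⟩
  obtain ⟨M, hM⟩ : ∃ M, PySem.List.max?
      (matrix.map (fun row => (PySem.List.max? row (fun x => x)).getD 0)) (fun x => x) = some M := by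
    cases hmm : PySem.List.max? (matrix.map (fun row => (PySem.List.max? row (fun x => x)).getD 0))
        (fun x => x) with
    | none =>
      rw [PySem.List.max?_eq_none_iff _ _] at hmm
      simp only [List.map_eq_nil_iff] at hmm
      exact absurd hmm hne
    | some M => exact ⟨M, rfl⟩
  have : m ≤ M := PySem.List.max?_isMax hM m hmmem
  rw [hM]
  simp only [Option.getD_some]
  omega

def pvMaxv (matrix : List (List Int)) : Int :=
  (PySem.List.max? (matrix.map (fun row => (PySem.List.max? row (fun x => x)).getD 0))
    (fun x => x)).getD 0

lemma pv_nested_eq (matrix : List (List Int)) (v : Int)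
    (st : List (List (Int × Int × Int)) × List (List Bool)) :
    ((PySem.List.pyRange 0 (matrix.length : Int)).foldl (fun st i =>
        (PySem.List.pyRange 0 ((pvCols matrix : Nat) : Int)).foldl (fun st j =>
          pvStepA matrix v st (i, j)) st) st) = pvPassL matrix v (pvCells matrix) st := by
  simp [pvPassL, pvCells, List.foldl_flatMap, List.foldl_map]

lemma pv_portA_eq (matrix : List (List Int)) :
    find_connected_regions matrix =
      ((PySem.List.pyRange 1 (pvMaxv matrix + 1)).foldl
        (fun st v => pvPassL matrix v (pvCells matrix) st) ([], pvVisInit matrix)).1 := by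
  have hfun : (fun (st : List (List (Int × Int × Int)) × List (List Bool)) (number : Int) =>
      (PySem.List.pyRange 0 (matrix.length : Int)).foldl (fun st i =>
        (PySem.List.pyRange 0 ((pvCols matrix : Nat) : Int)).foldl (fun st j =>
          pvStepA matrix number st (i, j)) st) st)
      = (fun st v => pvPassL matrix v (pvCells matrix) st) :=
    funext fun st => funext fun v => pv_nested_eq matrix v st
  calc find_connected_regions matrix
      = ((PySem.List.pyRange 1 (pvMaxv matrix + 1)).foldl
          (fun (st : List (List (Int × Int × Int)) × List (List Bool)) (number : Int) =>
            (PySem.List.pyRange 0 (matrix.length : Int)).foldl (fun st i =>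
              (PySem.List.pyRange 0 ((pvCols matrix : Nat) : Int)).foldl (fun st j =>
                pvStepA matrix number st (i, j)) st) st)
          ([], pvVisInit matrix)).1 := rfl
    _ = ((PySem.List.pyRange 1 (pvMaxv matrix + 1)).foldl
          (fun st v => pvPassL matrix v (pvCells matrix) st) ([], pvVisInit matrix)).1 := by
        rw [hfun]

-- B's enumerate scan equals the row-major cell fold of pvStepB (under Pre_: rows are long enough)
lemma pv_scanB_eq (matrix : List (List Int)) (hpre : Pre_find_connected_regions matrix)
    (st : PySem.Dict Int (List (List (Int × Int × Int))) × List (List Bool)) :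
    ((PySem.List.enumerate matrix).foldl (fun st p =>
        (PySem.List.pyRange 0 ((pvColsB matrix : Nat) : Int)).foldl (fun st j =>
          pvStepW matrix st p.1 p.2 j) st) st)
      = (pvCells matrix).foldl (pvStepB matrix) st := by
  rw [PySem.List.enumerate_eq_map_pyRange matrix ([] : List Int), List.foldl_map]
  rw [show (pvCells matrix).foldl (pvStepB matrix) st
      = (PySem.List.pyRange 0 (matrix.length : Int)).foldl (fun st i =>
          (PySem.List.pyRange 0 ((pvCols matrix : Nat) : Int)).foldl (fun st j =>
            pvStepB matrix st (i, j)) st) st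
    from by simp [pvCells, List.foldl_flatMap, List.foldl_map]]
  have hcc : pvColsB matrix = pvCols matrix := rfl
  rw [hcc, PySem.List.len_eq]
  refine PySem.List.foldl_congr_mem _ _ _ _ (fun acc i hi => ?_)
  rw [PySem.List.mem_pyRange_one] at hi
  refine PySem.List.foldl_congr_mem _ _ _ _ (fun acc' j hj => ?_)
  rw [PySem.List.mem_pyRange_one] at hj
  exact pv_stepW_eq_stepB matrix hpre acc' i j ⟨hi.1, hi.2⟩ ⟨hj.1, hj.2⟩

-- ===== VERDICT (by name: the statement is the Claim_ definition above) =====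
theorem find_connected_regions_spec : Claim_equal_find_connected_regions := by
  intro matrix hdom hpre
  unfold Spec_find_connected_regions
  obtain ⟨hknd, hshw, hkpos, hmain⟩ :=
    pv_rel_main matrix (pvCells matrix) (fun c hc => (pv_mem_cells matrix c).mp hc)
  set d := ((pvCells matrix).foldl (pvStepB matrix) (PySem.Dict.empty, pvVisInit matrix)).1 with hd
  have hLpair := pv_pyRange_pairwise_lt 1 (pvMaxv matrix + 1)
  have hLnd : (PySem.List.pyRange 1 (pvMaxv matrix + 1)).Nodup :=
    hLpair.imp (fun h => ne_of_lt h)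
  have hA : find_connected_regions matrix
      = (PySem.List.pyRange 1 (pvMaxv matrix + 1)).flatMap (pvP matrix) := by
    rw [pv_portA_eq, pv_outerA matrix _ hLnd [] (pvVisInit matrix) (pv_shape_init matrix)
      (fun u _ i j _ _ _ => rfl)]
    exact List.nil_append _
  have hgetD : ∀ v ∈ PySem.List.sorted d.keys (fun x => x), d.getD v [] = pvP matrix v := by
    intro v hv
    have hvk : v ∈ d.keys := (PySem.List.sorted_perm d.keys (fun x => x) false).mem_iff.mp hv
    rw [pvP]
    exact (hmain v (hkpos v hvk)).1
  have hB : find_connected_regions_alt matrix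
      = (PySem.List.sorted d.keys (fun x => x)).flatMap (pvP matrix) := by
    rw [find_connected_regions_alt]
    rw [show pvGrid0 matrix = pvVisInit matrix from rfl]
    rw [pv_scanB_eq matrix hpre]
    rw [PySem.List.foldl_append_eq_flatMap, List.nil_append]
    exact List.flatMap_congr hgetD
  have hkiff : ∀ v : Int, v ∈ d.keys ↔ (1 ≤ v ∧ pvP matrix v ≠ []) := by
    intro v
    constructor
    · intro hv
      exact ⟨hkpos v hv, ((hmain v (hkpos v hv)).2.1).mp hv⟩
    · rintro ⟨h1, h2⟩
      exact ((hmain v h1).2.1).mpr h2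
  have hsortnd : (PySem.List.sorted d.keys (fun x => x)).Nodup :=
    ((PySem.List.sorted_perm d.keys (fun x => x) false).nodup_iff).mpr hknd
  have hsortlt : (PySem.List.sorted d.keys (fun x => x)).Pairwise (· < ·) :=
    ((PySem.List.sorted_pairwise d.keys (fun x => x)).and hsortnd).imp
      (fun h => lt_of_le_of_ne h.1 h.2)
  have hfilter_eq : PySem.List.sorted d.keys (fun x => x)
      = (PySem.List.pyRange 1 (pvMaxv matrix + 1)).filter
          (fun v => !decide (pvP matrix v = [])) := by
    refine List.Perm.eq_of_pairwise (le := (· < ·))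
      (fun a b _ _ hab hba => absurd hba (lt_asymm hab)) hsortlt (hLpair.filter _) ?_
    rw [List.perm_ext_iff_of_nodup hsortnd (hLnd.filter _)]
    intro v
    rw [List.mem_filter, (PySem.List.sorted_perm d.keys (fun x => x) false).mem_iff, hkiff v,
      PySem.List.mem_pyRange_one]
    constructor
    · rintro ⟨h1, h2⟩
      exact ⟨⟨h1, by have := pv_le_maxv matrix hpre v h2; rw [pvMaxv] at *; omega⟩, by simpa using h2⟩
    · rintro ⟨⟨h1, -⟩, h2⟩
      exact ⟨h1, by simpa using h2⟩
  rw [hA, hB, hfilter_eq]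
  exact pv_flatMap_filter_ne_nil _ _
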